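-- pv_equiv track=rewrite | github.com/siriusdevs/homeworks_23 | hw2/utilites.py | get_age_stats
-- ===== SOURCE A (Python) =====
-- AGE18 = 18
--
-- AGE25 = 25
--
-- AGE45 = 45
--
-- AGE60 = 60
--
-- def get_age_group(age: int) -> str:
--     """
--     Return age group for age.
--
--     Args:
--         age (int): age of client
--
--     Returns:
--         str: age group
--     """
--     if age < AGE18:
--         return '0-18'
--     elif age < AGE25:
--         return '18-25'
--     elif age < AGE45:
--         return '25-45'
--     elif age < AGE60:
--         return '45-60'
--     return '60+'
--
-- def get_age_stats(input_dict: dict) -> dict: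
--     """
--     Calculate age stats for input_dict and return a dictionary with the stats.
--
--     Args:
--         input_dict (dict): dict with data about clients
--
--     Returns:
--         dict: dict with age stats
--     """
--     age_stats = {
--         '0-18': 0,
--         '18-25': 0,
--         '25-45': 0,
--         '45-60': 0,
--         '60+': 0,
--     }
--     for user in input_dict.keys():
--         age = input_dict[user]['age']
--         age_group = get_age_group(age)
--         age_stats[age_group] += 1
--     return age_stats
-- ===== SOURCE B (Python) =====
-- def get_age_stats(input_dict: dict) -> dict:
--     """Count clients per age group: extract all ages once, then count each
--     half-open interval [lo, hi) with a separate scan (no running accumulator)."""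
--     ages = [record['age'] for record in input_dict.values()]
--     bounds = [(None, 18), (18, 25), (25, 45), (45, 60), (60, None)]
--     labels = ['0-18', '18-25', '25-45', '45-60', '60+']
--     return {
--         label: sum(1 for a in ages
--                    if (lo is None or a >= lo) and (hi is None or a < hi))
--         for label, (lo, hi) in zip(labels, bounds)
--     }
-- ===== Notes on version B (the rewrite author's own statement) =====
-- stated objective: alternative
-- what changed: Instead of one pass that classifies each client with the if-elif ladder and increments a seeded result dict, B first extracts the list of ages and then builds the result by counting, for each of the five half-open interval bounds, how many ages fall in that interval (five independent filtered counts, no mutable accumulator and no classification function).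
import Mathlib
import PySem

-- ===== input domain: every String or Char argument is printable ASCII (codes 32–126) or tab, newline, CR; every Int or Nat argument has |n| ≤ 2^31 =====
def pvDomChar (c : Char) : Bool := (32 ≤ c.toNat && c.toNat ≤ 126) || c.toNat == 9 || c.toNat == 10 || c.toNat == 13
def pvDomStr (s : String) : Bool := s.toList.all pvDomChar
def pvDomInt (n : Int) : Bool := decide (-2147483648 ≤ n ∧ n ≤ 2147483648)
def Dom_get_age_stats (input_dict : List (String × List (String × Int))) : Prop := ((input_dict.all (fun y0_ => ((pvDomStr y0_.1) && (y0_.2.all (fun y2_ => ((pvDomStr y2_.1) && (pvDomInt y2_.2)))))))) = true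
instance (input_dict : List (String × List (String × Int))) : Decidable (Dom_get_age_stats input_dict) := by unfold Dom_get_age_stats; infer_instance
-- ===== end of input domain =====

-- B replaces A's single classifying pass (if-elif ladder + seeded result dict) by extracting
-- the age list once and counting each half-open interval with an independent scan (alternative, same cost).


-- ===== PORT A =====
def get_age_group (age : Int) : String :=
  if age < 18 then "0-18"
  else if age < 25 then "18-25"
  else if age < 45 then "25-45"
  else if age < 60 then "45-60"
  else "60+"

def get_age_stats (input_dict : List (String × List (String × Int))) : List (String × Int) :=
  let age_stats : PySem.Dict String Int :=
    PySem.Dict.mk [("0-18", 0), ("18-25", 0), ("25-45", 0), ("45-60", 0), ("60+", 0)]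
  ((input_dict.map Prod.fst).foldl (fun stats user =>
      let age := (PySem.Dict.mk ((PySem.Dict.mk input_dict).getD user [])).getD "age" 0
      let age_group := get_age_group age
      stats.modify age_group 0 (· + 1)) age_stats).items

-- ===== PORT B =====
-- membership in the half-open interval [lo, hi) with open ends (None)
def pvInGroup (lo hi : Option Int) (a : Int) : Bool :=
  (lo.all (fun x => x ≤ a)) && (hi.all (fun x => a < x))

def get_age_stats_alt (input_dict : List (String × List (String × Int))) : List (String × Int) :=
  let ages := input_dict.map (fun record => (PySem.Dict.mk record.2).getD "age" 0)
  let bounds : List (Option Int × Option Int) :=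
    [(none, some 18), (some 18, some 25), (some 25, some 45), (some 45, some 60), (some 60, none)]
  let labels := ["0-18", "18-25", "25-45", "45-60", "60+"]
  (labels.zip bounds).map (fun lb => (lb.1, ((ages.countP (pvInGroup lb.2.1 lb.2.2)) : Int)))

-- ===== PRECONDITION & SPEC =====
-- Pre_ excludes assoc lists with duplicate outer keys (no Python dict can contain them, so the
-- encoding is ambiguous) and inner dicts without an 'age' key (there A raises KeyError).
def Pre_get_age_stats (input_dict : List (String × List (String × Int))) : Prop :=
  (input_dict.map Prod.fst).Nodup ∧ ∀ kv ∈ input_dict, "age" ∈ kv.2.map Prod.fst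
instance (input_dict : List (String × List (String × Int))) : Decidable (Pre_get_age_stats input_dict) := by unfold Pre_get_age_stats; infer_instance

def pvWitness_get_age_stats : (List (String × List (String × Int))) :=
  [("alice", [("age", 30)]), ("bob", [("age", 17)])]

def Spec_get_age_stats (input_dict : List (String × List (String × Int))) (out : List (String × Int)) : Prop := out = get_age_stats_alt input_dict
instance (input_dict : List (String × List (String × Int))) (out : List (String × Int)) : Decidable (Spec_get_age_stats input_dict out) := by unfold Spec_get_age_stats; infer_instance

-- ===== CLAIM (what is proved, stated in full; the proofs are below) =====
def Claim_equal_get_age_stats : Prop := ∀ (input_dict : List (String × List (String × Int))), Dom_get_age_stats input_dict → Pre_get_age_stats input_dict → Spec_get_age_stats input_dict (get_age_stats input_dict)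

-- ===== LEMMAS AND PROOFS =====

-- shared per-user age extraction
def pvAge (user : String × List (String × Int)) : Int :=
  (PySem.Dict.mk user.2).getD "age" 0

-- main invariant: A's dict fold over the entries equals the five interval counts of B
lemma pv_fold_count (l : List (String × List (String × Int))) (c0 c1 c2 c3 c4 : Int) :
    (l.foldl (fun stats kv =>
        stats.modify (get_age_group (pvAge kv)) 0 (· + 1))
      (PySem.Dict.mk [("0-18", c0), ("18-25", c1), ("25-45", c2), ("45-60", c3), ("60+", c4)])).items
    = [("0-18", c0 + (((l.map pvAge).countP (pvInGroup none (some 18))) : Int)),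
       ("18-25", c1 + (((l.map pvAge).countP (pvInGroup (some 18) (some 25))) : Int)),
       ("25-45", c2 + (((l.map pvAge).countP (pvInGroup (some 25) (some 45))) : Int)),
       ("45-60", c3 + (((l.map pvAge).countP (pvInGroup (some 45) (some 60))) : Int)),
       ("60+", c4 + (((l.map pvAge).countP (pvInGroup (some 60) none)) : Int))] := by
  induction l generalizing c0 c1 c2 c3 c4 with
  | nil => simp
  | cons kv t ih =>
      simp only [List.foldl_cons, List.map_cons, List.countP_cons]
      rcases lt_or_ge (pvAge kv) 18 with h18 | h18
      · have hA : get_age_group (pvAge kv) = "0-18" := by simp [get_age_group, h18]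
        rw [hA]
        rw [show (PySem.Dict.mk [("0-18", c0), ("18-25", c1), ("25-45", c2), ("45-60", c3), ("60+", c4)]).modify "0-18" 0 (· + 1)
              = PySem.Dict.mk [("0-18", c0 + 1), ("18-25", c1), ("25-45", c2), ("45-60", c3), ("60+", c4)] from rfl]
        rw [ih]
        simp [pvInGroup, h18, not_le.mpr (by omega : pvAge kv < 25),
              not_le.mpr (by omega : pvAge kv < 45), not_le.mpr (by omega : pvAge kv < 60)]
        omega
      · rcases lt_or_ge (pvAge kv) 25 with h25 | h25
        · have hA : get_age_group (pvAge kv) = "18-25" := by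
            simp [get_age_group, h25, not_lt.mpr h18]
          rw [hA]
          rw [show (PySem.Dict.mk [("0-18", c0), ("18-25", c1), ("25-45", c2), ("45-60", c3), ("60+", c4)]).modify "18-25" 0 (· + 1)
                = PySem.Dict.mk [("0-18", c0), ("18-25", c1 + 1), ("25-45", c2), ("45-60", c3), ("60+", c4)] from rfl]
          rw [ih]
          simp [pvInGroup, h18, h25, not_lt.mpr h18,
                not_le.mpr (by omega : pvAge kv < 45), not_le.mpr (by omega : pvAge kv < 60)]
          omega
        · rcases lt_or_ge (pvAge kv) 45 with h45 | h45
          · have hA : get_age_group (pvAge kv) = "25-45" := by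
              simp [get_age_group, h45, not_lt.mpr h18, not_lt.mpr h25]
            rw [hA]
            rw [show (PySem.Dict.mk [("0-18", c0), ("18-25", c1), ("25-45", c2), ("45-60", c3), ("60+", c4)]).modify "25-45" 0 (· + 1)
                  = PySem.Dict.mk [("0-18", c0), ("18-25", c1), ("25-45", c2 + 1), ("45-60", c3), ("60+", c4)] from rfl]
            rw [ih]
            simp [pvInGroup, h45, h25, not_lt.mpr h18, not_lt.mpr h25,
                  not_le.mpr (by omega : pvAge kv < 60)]
            omega
          · rcases lt_or_ge (pvAge kv) 60 with h60 | h60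
            · have hA : get_age_group (pvAge kv) = "45-60" := by
                simp [get_age_group, h60, not_lt.mpr h18, not_lt.mpr h25, not_lt.mpr h45]
              rw [hA]
              rw [show (PySem.Dict.mk [("0-18", c0), ("18-25", c1), ("25-45", c2), ("45-60", c3), ("60+", c4)]).modify "45-60" 0 (· + 1)
                    = PySem.Dict.mk [("0-18", c0), ("18-25", c1), ("25-45", c2), ("45-60", c3 + 1), ("60+", c4)] from rfl]
              rw [ih]
              simp [pvInGroup, h60, h45, not_lt.mpr h18, not_lt.mpr h25, not_lt.mpr h45]
              omega
            · have hA : get_age_group (pvAge kv) = "60+" := by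
                simp [get_age_group, not_lt.mpr h18, not_lt.mpr h25, not_lt.mpr h45, not_lt.mpr h60]
              rw [hA]
              rw [show (PySem.Dict.mk [("0-18", c0), ("18-25", c1), ("25-45", c2), ("45-60", c3), ("60+", c4)]).modify "60+" 0 (· + 1)
                    = PySem.Dict.mk [("0-18", c0), ("18-25", c1), ("25-45", c2), ("45-60", c3), ("60+", c4 + 1)] from rfl]
              rw [ih]
              simp [pvInGroup, h60, not_lt.mpr h18, not_lt.mpr h25, not_lt.mpr h45, not_lt.mpr h60]
              omega

-- under nodup keys, looking up a member's key in the whole dict returns its own value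
lemma pv_lookup_self (l : List (String × List (String × Int)))
    (hnd : (l.map Prod.fst).Nodup) (kv : String × List (String × Int)) (hm : kv ∈ l) :
    (PySem.Dict.mk l).getD kv.1 [] = kv.2 :=
  PySem.Dict.getD_of_mem_items (d := PySem.Dict.mk l) hm hnd []

-- ===== VERDICT (by name: the statement is the Claim_ definition above) =====
theorem get_age_stats_spec : Claim_equal_get_age_stats := by
  intro l _ hpre
  unfold Spec_get_age_stats get_age_stats get_age_stats_alt
  simp only [List.foldl_map]
  have hcongr := PySem.List.foldl_congr_mem (l := l)
      (init := PySem.Dict.mk [("0-18", (0:Int)), ("18-25", 0), ("25-45", 0), ("45-60", 0), ("60+", 0)])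
      (f := fun stats kv => PySem.Dict.modify stats
        (get_age_group ((PySem.Dict.mk ((PySem.Dict.mk l).getD kv.1 [])).getD "age" 0)) 0 (· + 1))
      (g := fun stats kv => PySem.Dict.modify stats (get_age_group (pvAge kv)) 0 (· + 1))
      (by intro stats kv hm
          simp only [pvAge, pv_lookup_self l hpre.1 kv hm])
  rw [hcongr, pv_fold_count l 0 0 0 0 0]
  simp [List.zip, List.map]
  exact ⟨rfl, rfl, rfl, rfl, rfl⟩
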